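-- pv_equiv track=rewrite | github.com/hyeonzi423/Algorithm | 백준/Bronze/24416. 알고리즘 수업 － 피보나치 수 1/알고리즘 수업 － 피보나치 수 1.py | dynamic_fib
-- ===== SOURCE A (Python) =====
-- def dynamic_fib(n):
--     fib = [0]*(n+1)
--     fib[1], fib[2] = 1, 1
--     cnt = 0
--     for i in range(3, n+1):
--         fib[i] = fib[i-1] + fib[i-2]
--         cnt += 1
--     return cnt
-- ===== SOURCE B (Python) =====
-- def dynamic_fib(n):
--     # The DP loop does exactly one addition per i in range(3, n+1): n-2 of them (0 when n < 3).
--     return max(n - 2, 0)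
-- ===== Notes on version B (the rewrite author's own statement) =====
-- stated objective: faster
-- what changed: Replaces the O(n) DP table build that only counts its additions with the closed form max(n-2, 0).
import Mathlib
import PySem

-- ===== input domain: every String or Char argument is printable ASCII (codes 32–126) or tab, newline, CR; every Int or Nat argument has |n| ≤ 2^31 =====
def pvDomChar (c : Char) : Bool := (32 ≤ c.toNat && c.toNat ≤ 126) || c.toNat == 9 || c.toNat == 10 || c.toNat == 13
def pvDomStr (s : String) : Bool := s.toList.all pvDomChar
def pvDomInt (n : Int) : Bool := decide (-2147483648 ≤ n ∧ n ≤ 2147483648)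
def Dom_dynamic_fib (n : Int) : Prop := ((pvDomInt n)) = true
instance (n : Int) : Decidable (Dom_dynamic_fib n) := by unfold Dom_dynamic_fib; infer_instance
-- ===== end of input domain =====

-- B replaces A's O(n) DP-table loop (which only counts its additions) with the closed form max(n-2, 0).

-- ===== PORT A =====
-- fib = [0]*(n+1); fib[1], fib[2] = 1, 1; cnt = 0; for i in range(3, n+1): fib[i] = fib[i-1]+fib[i-2]; cnt += 1; return cnt
def dynamic_fib (n : Int) : Int :=
  let fib := List.replicate (n + 1).toNat (0 : Int)
  let fib := PySem.List.pySetD fib 1 1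
  let fib := PySem.List.pySetD fib 2 1
  let st := (PySem.List.pyRange 3 (n + 1) 1).foldl
    (fun (st : List Int × Int) i =>
      (PySem.List.pySetD st.1 i (PySem.List.pyGetD st.1 (i - 1) 0 + PySem.List.pyGetD st.1 (i - 2) 0),
       st.2 + 1))
    (fib, 0)
  st.2

-- ===== PORT B =====
def dynamic_fib_alt (n : Int) : Int := max (n - 2) 0

-- ===== PRECONDITION & SPEC =====
-- Pre_ excludes exactly n < 2, where Python A raises IndexError assigning fib[1] or fib[2].
def Pre_dynamic_fib (n : Int) : Prop := 2 ≤ n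
instance (n : Int) : Decidable (Pre_dynamic_fib n) := by unfold Pre_dynamic_fib; infer_instance
def pvWitness_dynamic_fib : Int := 5

def Spec_dynamic_fib (n : Int) (out : Int) : Prop := out = dynamic_fib_alt n
instance (n : Int) (out : Int) : Decidable (Spec_dynamic_fib n out) := by unfold Spec_dynamic_fib; infer_instance

-- ===== CLAIM (what is proved, stated in full; the proofs are below) =====
def Claim_equal_dynamic_fib : Prop := ∀ (n : Int), Dom_dynamic_fib n → Pre_dynamic_fib n → Spec_dynamic_fib n (dynamic_fib n)

-- ===== LEMMAS AND PROOFS =====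

-- the second component of the fold just counts the elements
theorem snd_foldl_count (l : List Int) (f : List Int → Int → List Int) :
    ∀ (fib : List Int) (c : Int),
      (l.foldl (fun (st : List Int × Int) i => (f st.1 i, st.2 + 1)) (fib, c)).2
        = c + l.length := by
  induction l with
  | nil => intro fib c; simp
  | cons x xs ih =>
    intro fib c
    simp only [List.foldl_cons, ih, List.length_cons]
    omega

-- ===== VERDICT (by name: the statement is the Claim_ definition above) =====
theorem dynamic_fib_spec : Claim_equal_dynamic_fib := by
  intro n _ hn
  unfold Spec_dynamic_fib dynamic_fib dynamic_fib_alt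
  rw [snd_foldl_count _ (fun fib i =>
    PySem.List.pySetD fib i (PySem.List.pyGetD fib (i - 1) 0 + PySem.List.pyGetD fib (i - 2) 0))]
  rw [PySem.List.length_pyRange_one]
  omega
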